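-- pv_equiv track=rewrite | github.com/jaymindesai/programming-playground | problems/djikstra/main.py | _find_paths_with_fewest_edges
-- ===== SOURCE A (Python) =====
-- from math import inf
--
-- def _find_paths_with_fewest_edges(paths):
--     smaller_paths = []
--     mx = inf
--     for p in paths:
--         p.reverse()
--         if len(p) < mx:
--             smaller_paths.clear()
--             smaller_paths.append(p)
--             mx = len(p)
--         elif len(p) == mx:
--             smaller_paths.append(p)
--     return smaller_paths
-- ===== SOURCE B (Python) =====
-- from math import inf
--
-- def _find_paths_with_fewest_edges(paths):
--     for p in paths:
--         p.reverse()
--     m = min((len(p) for p in paths), default=inf)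
--     return [p for p in paths if len(p) == m]
-- ===== Notes on version B (the rewrite author's own statement) =====
-- stated objective: simpler
-- what changed: Replaces A's single stateful pass with clear/append and a running minimum by a reverse pass, a min over lengths, and a filter comprehension.
import Mathlib
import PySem

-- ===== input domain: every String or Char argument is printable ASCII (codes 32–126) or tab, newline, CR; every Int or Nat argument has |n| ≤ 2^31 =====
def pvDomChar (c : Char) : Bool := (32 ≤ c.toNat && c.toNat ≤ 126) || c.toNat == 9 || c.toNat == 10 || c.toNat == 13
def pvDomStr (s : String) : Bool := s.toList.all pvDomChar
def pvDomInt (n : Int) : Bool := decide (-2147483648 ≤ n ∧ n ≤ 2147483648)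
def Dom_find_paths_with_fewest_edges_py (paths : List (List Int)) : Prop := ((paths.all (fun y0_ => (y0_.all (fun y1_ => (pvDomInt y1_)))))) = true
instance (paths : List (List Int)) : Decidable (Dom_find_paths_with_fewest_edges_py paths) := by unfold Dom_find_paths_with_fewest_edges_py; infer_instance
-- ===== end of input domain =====

-- B replaces A's single stateful pass (clear/append/running minimum) by: reverse every path,
-- take the minimum length, filter; objective: simpler. Both A and B reverse each path IN PLACE
-- in Python (same mutation); the equivalence proved here is about the return value.


-- ===== PORT A =====
-- loop body of A: reverse p, then compare len(p) with mx (mx = inf modelled as `none`)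
def pvStepA (st : List (List Int) × Option Nat) (p : List Int) : List (List Int) × Option Nat :=
  let q := p.reverse
  match st with
  | (_, none) => ([q], some q.length)            -- len(p) < inf: clear, append, mx = len(p)
  | (sp, some mx) =>
    if q.length < mx then ([q], some q.length)
    else if q.length = mx then (sp ++ [q], some mx)
    else (sp, some mx)

def find_paths_with_fewest_edges_py (paths : List (List Int)) : List (List Int) :=
  (paths.foldl pvStepA ([], none)).1

-- ===== PORT B =====
def find_paths_with_fewest_edges_py_alt (paths : List (List Int)) : List (List Int) :=
  let rev := paths.map List.reverse
  match (rev.map List.length).min? with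
  | none => []                                    -- min(..., default=inf): no path has len == inf
  | some m => rev.filter (fun p => p.length == m)

-- ===== PRECONDITION & SPEC =====
def Spec_find_paths_with_fewest_edges_py (paths : List (List Int)) (out : List (List Int)) : Prop := out = find_paths_with_fewest_edges_py_alt paths
instance (paths : List (List Int)) (out : List (List Int)) : Decidable (Spec_find_paths_with_fewest_edges_py paths out) := by unfold Spec_find_paths_with_fewest_edges_py; infer_instance

-- ===== CLAIM (what is proved, stated in full; the proofs are below) =====
def Claim_equal_find_paths_with_fewest_edges_py : Prop := ∀ (paths : List (List Int)), Dom_find_paths_with_fewest_edges_py paths → Spec_find_paths_with_fewest_edges_py paths (find_paths_with_fewest_edges_py paths)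

-- ===== LEMMAS AND PROOFS =====
lemma pv_foldr_min_exch (a l : Nat) (ls : List Nat) :
    ls.foldr min (min l a) = min a (ls.foldr min l) := by
  induction ls with
  | nil => simp [Nat.min_comm]
  | cons b r ih => simp only [List.foldr, ih]; omega

lemma pv_foldl_min_eq_foldr (l : Nat) (ls : List Nat) :
    ls.foldl min l = ls.foldr min l := by
  induction ls generalizing l with
  | nil => rfl
  | cons a r ih => simp only [List.foldl, List.foldr, ih, pv_foldr_min_exch]

lemma pv_min?_cons (a : Nat) (ls : List Nat) : (a :: ls).min? = some (ls.foldr min a) := by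
  rw [← pv_foldl_min_eq_foldr]; rfl

lemma pv_foldr_min_le (mx : Nat) (ls : List Nat) : ls.foldr min mx ≤ mx := by
  induction ls with
  | nil => simp
  | cons a r ih => simp only [List.foldr]; omega

-- reseeding the running minimum with a smaller-or-equal value
lemma pv_foldr_min_seed (l mx : Nat) (h : l ≤ mx) (ls : List Nat) :
    ls.foldr min l = min l (ls.foldr min mx) := by
  induction ls with
  | nil => simp; omega
  | cons a r ih => simp only [List.foldr, ih]; omega

-- characterisation of A's loop from a state (sp, some mx)
lemma pv_charA (paths : List (List Int)) (sp : List (List Int)) (mx : Nat) :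
    (paths.foldl pvStepA (sp, some mx)).1 =
      (if (paths.map List.length).foldr min mx < mx then [] else sp)
      ++ (paths.map List.reverse).filter
          (fun q => q.length == (paths.map List.length).foldr min mx) := by
  induction paths generalizing sp mx with
  | nil => simp
  | cons p rest ih =>
    have hle : (rest.map List.length).foldr min mx ≤ mx := pv_foldr_min_le _ _
    simp only [List.foldl, List.map, List.foldr, List.filter_cons, List.length_reverse]
    by_cases h1 : p.length < mx
    · have hstep : pvStepA (sp, some mx) p = ([p.reverse], some p.length) := by
        simp [pvStepA, h1]
      rw [hstep, ih, pv_foldr_min_seed p.length mx (le_of_lt h1)]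
      have hlt : min p.length ((rest.map List.length).foldr min mx) < mx := by omega
      by_cases h2 : (rest.map List.length).foldr min mx < p.length
      · have hq : (p.length == min p.length ((rest.map List.length).foldr min mx)) = false := by
          simp; omega
        have h3 : min p.length ((rest.map List.length).foldr min mx) < p.length := by omega
        simp [hq, hlt, h3]
      · have hq : (p.length == min p.length ((rest.map List.length).foldr min mx)) = true := by
          simp; omega
        have h3 : ¬ min p.length ((rest.map List.length).foldr min mx) < p.length := by omega
        simp [hq, hlt, h3]
    · by_cases h2 : p.length = mx
      · have hstep : pvStepA (sp, some mx) p = (sp ++ [p.reverse], some mx) := by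
          simp only [pvStepA, List.length_reverse]
          split_ifs <;> rfl
        rw [hstep, ih]
        have hmin : min p.length ((rest.map List.length).foldr min mx) = (rest.map List.length).foldr min mx := by omega
        simp only [hmin]
        by_cases h3 : (rest.map List.length).foldr min mx < mx
        · have hq : (p.length == (rest.map List.length).foldr min mx) = false := by simp; omega
          simp [hq, h3]
        · have hq : (p.length == (rest.map List.length).foldr min mx) = true := by simp; omega
          simp [hq, h3]
      · have hstep : pvStepA (sp, some mx) p = (sp, some mx) := by
          simp only [pvStepA, List.length_reverse]
          split_ifs <;> rfl
        rw [hstep, ih]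
        have hmin : min p.length ((rest.map List.length).foldr min mx) = (rest.map List.length).foldr min mx := by omega
        simp only [hmin]
        have hq : (p.length == (rest.map List.length).foldr min mx) = false := by simp; omega
        simp [hq]

-- ===== VERDICT (by name: the statement is the Claim_ definition above) =====
theorem find_paths_with_fewest_edges_py_spec : Claim_equal_find_paths_with_fewest_edges_py := by
  intro paths _
  unfold Spec_find_paths_with_fewest_edges_py
  cases paths with
  | nil => rfl
  | cons p rest =>
    unfold find_paths_with_fewest_edges_py find_paths_with_fewest_edges_py_alt
    simp only [List.foldl, List.map, List.map_map]
    have hcomp : rest.map (List.length ∘ List.reverse) = rest.map List.length := by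
      simp [Function.comp]
    have hstep : pvStepA ([], none) p = ([p.reverse], some p.length) := by
      simp [pvStepA]
    rw [hstep, pv_charA, List.length_reverse, hcomp, pv_min?_cons]
    have hle : (rest.map List.length).foldr min p.length ≤ p.length := pv_foldr_min_le _ _
    simp only [List.filter_cons, List.length_reverse]
    by_cases h : (rest.map List.length).foldr min p.length < p.length
    · have hq : (p.length == (rest.map List.length).foldr min p.length) = false := by simp; omega
      simp [hq, h]
    · have hq : (p.length == (rest.map List.length).foldr min p.length) = true := by simp; omega
      simp [hq, h]
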